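-- pv_equiv track=rewrite | github.com/michaelsedbon/PhD | experiments/EXP_001/scripts/primer_design.py | _min_bsai_dist
-- ===== SOURCE A (Python) =====
-- from bisect import bisect_left, bisect_right
-- from typing import Dict, List, Optional, Tuple
--
-- def _min_bsai_dist(pos: int, bsai_positions: List[int]) -> int:
--     """Min distance from pos to any BsaI site."""
--     if not bsai_positions:
--         return 999999
--     idx = bisect_left(bsai_positions, pos)
--     dists = []
--     for i in (idx - 1, idx, idx + 1):
--         if 0 <= i < len(bsai_positions):
--             dists.append(abs(pos - bsai_positions[i]))
--     return min(dists) if dists else 999999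
-- ===== SOURCE B (Python) =====
-- from typing import List
--
--
-- def _min_bsai_dist(pos: int, bsai_positions: List[int]) -> int:
--     """Min distance from pos to any BsaI site (recursive halving on slices)."""
--     if not bsai_positions:
--         return 999999
--
--     def locate(seg: List[int]) -> int:
--         # insertion point of pos within seg, halving on slices
--         if not seg:
--             return 0
--         m = len(seg) // 2
--         if seg[m] < pos:
--             return m + 1 + locate(seg[m + 1:])
--         return locate(seg[:m])
--
--     i = locate(bsai_positions)
--     window = bsai_positions[max(0, i - 1):i + 2]
--     return min(abs(pos - p) for p in window)
-- ===== Notes on version B (the rewrite author's own statement) =====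
-- stated objective: alternative
-- what changed: Replaces the library bisect_left call with a recursive divide-and-conquer locate over list slices, and replaces the idx-1/idx/idx+1 index loop that builds the dists list (with bounds checks and a sentinel fallback) by one clamped slice l[max(0,i-1):i+2] reduced with a generator min; same window-min value on every input, so the equivalence is total with no precondition.
import Mathlib
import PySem

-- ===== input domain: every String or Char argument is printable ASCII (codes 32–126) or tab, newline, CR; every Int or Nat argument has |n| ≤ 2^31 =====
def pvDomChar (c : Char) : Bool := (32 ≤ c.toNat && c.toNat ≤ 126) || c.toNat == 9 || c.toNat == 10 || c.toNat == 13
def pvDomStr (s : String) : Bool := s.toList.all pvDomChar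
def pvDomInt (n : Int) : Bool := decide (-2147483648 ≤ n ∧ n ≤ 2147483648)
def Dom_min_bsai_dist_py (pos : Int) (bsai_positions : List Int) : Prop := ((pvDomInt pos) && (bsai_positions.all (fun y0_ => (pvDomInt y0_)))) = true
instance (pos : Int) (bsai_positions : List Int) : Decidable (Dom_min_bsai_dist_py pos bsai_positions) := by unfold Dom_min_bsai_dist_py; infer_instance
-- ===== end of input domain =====

-- B computes the same window-min with a recursive halving over slices and one clamped
-- slice window instead of library bisect plus an index-window loop (alternative, not faster).

-- ===== PORT A =====
-- literal transliteration of Python's bisect.bisect_left(a, x) (lo=0, hi=len(a));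
-- the `lo < hi` guard is the loop condition, a.getD mid 0 is a[mid] (mid is always in range here)
def bisectLeftGo (a : List Int) (x : Int) (lo hi : Nat) : Nat :=
  if _h : lo < hi then
    let mid := (lo + hi) / 2
    if a.getD mid 0 < x then bisectLeftGo a x (mid + 1) hi
    else bisectLeftGo a x lo mid
  else lo
termination_by hi - lo
decreasing_by all_goals omega

def min_bsai_dist_py (pos : Int) (bsai_positions : List Int) : Int :=
  if bsai_positions = [] then 999999
  else
    let idx : Int := (bisectLeftGo bsai_positions pos 0 bsai_positions.length : Nat)
    let dists : List Int :=
      [idx - 1, idx, idx + 1].foldl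
        (fun acc i =>
          if 0 ≤ i ∧ i < (bsai_positions.length : Int) then
            acc ++ [|pos - bsai_positions.getD i.toNat 0|]
          else acc) []
    match PySem.List.min? dists (fun y => y) with
    | some m => m
    | none => 999999

-- ===== PORT B =====
-- literal transliteration of Source B's recursive locate: seg[m] is seg.getD m 0 (m = len//2 is
-- in range for nonempty seg); the slices seg[m+1:] / seg[:m] are drop (m+1) / take m,
-- exact for these nonnegative in-range bounds
def locateGo (x : Int) (seg : List Int) : Nat :=
  if h : seg = [] then 0
  else
    let m := seg.length / 2
    if seg.getD m 0 < x then m + 1 + locateGo x (seg.drop (m + 1))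
    else locateGo x (seg.take m)
termination_by seg.length
decreasing_by
  all_goals
    have hl : 0 < seg.length := List.length_pos_iff.mpr h
    simp
    omega

def min_bsai_dist_py_alt (pos : Int) (bsai_positions : List Int) : Int :=
  if bsai_positions = [] then 999999
  else
    let i := locateGo pos bsai_positions
    let window := PySem.List.slice bsai_positions (some (max 0 ((i : Int) - 1))) (some ((i : Int) + 2))
    match PySem.List.min? (window.map (fun p => |pos - p|)) (fun v => v) with
    | some m => m
    | none => 999999  -- unreachable: the window is nonempty whenever the list is

-- ===== PRECONDITION & SPEC =====
def Spec_min_bsai_dist_py (pos : Int) (bsai_positions : List Int) (out : Int) : Prop :=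
  out = min_bsai_dist_py_alt pos bsai_positions
instance (pos : Int) (bsai_positions : List Int) (out : Int) : Decidable (Spec_min_bsai_dist_py pos bsai_positions out) := by
  unfold Spec_min_bsai_dist_py; infer_instance

-- ===== CLAIM (what is proved, stated in full; the proofs are below) =====
def Claim_equal_min_bsai_dist_py : Prop := ∀ (pos : Int) (bsai_positions : List Int), Dom_min_bsai_dist_py pos bsai_positions → Spec_min_bsai_dist_py pos bsai_positions (min_bsai_dist_py pos bsai_positions)

-- ===== LEMMAS AND PROOFS =====

-- B's locate never exceeds the segment length
lemma locateGo_le_aux (x : Int) : ∀ (n : Nat) (seg : List Int), seg.length ≤ n → locateGo x seg ≤ seg.length := by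
  intro n
  induction n with
  | zero =>
    intro seg h
    have : seg = [] := List.length_eq_zero_iff.mp (by omega)
    rw [locateGo, dif_pos this]
    exact Nat.zero_le _
  | succ n ih =>
    intro seg h
    rw [locateGo]
    by_cases hne : seg = []
    · rw [dif_pos hne]; exact Nat.zero_le _
    · rw [dif_neg hne]
      have hl : 0 < seg.length := List.length_pos_iff.mpr hne
      by_cases hc : seg.getD (seg.length / 2) 0 < x
      · rw [if_pos hc]
        have h1 := ih (seg.drop (seg.length / 2 + 1)) (by simp; omega)
        simp at h1
        omega
      · rw [if_neg hc]
        have h1 := ih (seg.take (seg.length / 2)) (by simp; omega)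
        simp at h1
        omega

lemma locateGo_le (x : Int) (seg : List Int) : locateGo x seg ≤ seg.length :=
  locateGo_le_aux x seg.length seg (le_refl _)

-- getElem of a drop/take slice, as getD
lemma take_drop_getElem (a : List Int) (s k t : Nat) (ht : t < ((a.drop s).take k).length) :
    ((a.drop s).take k)[t] = a.getD (s + t) 0 := by
  have h3 : s + t < a.length := by simp at ht; omega
  rw [List.getD_eq_getElem _ 0 h3]
  simp [List.getElem_take, List.getElem_drop]

-- B's recursive halving on the slice a[lo:hi] lands on the same index as A's bisect loop
lemma locateGo_eq_bisectLeftGo (a : List Int) (x : Int) :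
    ∀ (n lo hi : Nat), hi - lo ≤ n → lo ≤ hi → hi ≤ a.length →
    locateGo x ((a.drop lo).take (hi - lo)) + lo = bisectLeftGo a x lo hi := by
  intro n
  induction n with
  | zero =>
    intro lo hi hn hle hhi
    have : lo = hi := by omega
    subst this
    rw [bisectLeftGo, dif_neg (by omega)]
    simp [locateGo]
  | succ n ih =>
    intro lo hi hn hle hhi
    set seg := (a.drop lo).take (hi - lo) with hseg
    have hsl : seg.length = hi - lo := by
      rw [hseg]
      simp
      omega
    by_cases hlt : lo < hi
    · have hne : seg ≠ [] := by
        intro hnil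
        rw [hnil] at hsl
        simp at hsl
        omega
      have hm : seg.length / 2 = (hi - lo) / 2 := by rw [hsl]
      have hmlt : (hi - lo) / 2 < hi - lo := by omega
      have hgm : seg.getD (seg.length / 2) 0 = a.getD (lo + (hi - lo) / 2) 0 := by
        rw [hm, hseg]
        rw [List.getD_eq_getElem _ 0 (by simp; omega),
            List.getD_eq_getElem _ 0 (by omega)]
        simp
      have hmid : (lo + hi) / 2 = lo + (hi - lo) / 2 := by omega
      rw [bisectLeftGo, dif_pos hlt, locateGo, dif_neg hne]
      simp only [hgm, hmid]
      by_cases hcmp : a.getD (lo + (hi - lo) / 2) 0 < x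
      · rw [if_pos hcmp, if_pos hcmp]
        have hdrop : seg.drop (seg.length / 2 + 1) =
            (a.drop (lo + (hi - lo) / 2 + 1)).take (hi - (lo + (hi - lo) / 2 + 1)) := by
          rw [hm, hseg, List.drop_take, List.drop_drop]
          have e1 : hi - lo - ((hi - lo) / 2 + 1) = hi - (lo + (hi - lo) / 2 + 1) := by omega
          have e2 : lo + ((hi - lo) / 2 + 1) = lo + (hi - lo) / 2 + 1 := by omega
          rw [e1, e2]
        rw [hdrop]
        have := ih (lo + (hi - lo) / 2 + 1) hi (by omega) (by omega) hhi
        omega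
      · rw [if_neg hcmp, if_neg hcmp]
        have htake : seg.take (seg.length / 2) =
            (a.drop lo).take ((lo + (hi - lo) / 2) - lo) := by
          rw [hm, hseg, List.take_take]
          have e3 : min ((hi - lo) / 2) (hi - lo) = lo + (hi - lo) / 2 - lo := by omega
          rw [e3]
        rw [htake]
        have := ih lo (lo + (hi - lo) / 2) (by omega) (by omega) (by omega)
        omega
    · have : lo = hi := by omega
      subst this
      rw [bisectLeftGo, dif_neg (by omega)]
      simp [hseg, locateGo]
-- membership in A's window-building fold
lemma mem_windowFold (pos : Int) (a : List Int) :
    ∀ (is acc : List Int) (d : Int),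
    (d ∈ is.foldl
        (fun acc i =>
          if 0 ≤ i ∧ i < (a.length : Int) then
            acc ++ [|pos - a.getD i.toNat 0|]
          else acc) acc) ↔
    (d ∈ acc ∨ ∃ i ∈ is, (0 ≤ i ∧ i < (a.length : Int)) ∧ d = |pos - a.getD i.toNat 0|) := by
  intro is
  induction is with
  | nil => simp
  | cons i t ih =>
    intro acc d
    simp only [List.foldl, ih, List.mem_cons]
    split_ifs with hc
    · simp only [List.mem_append, List.mem_singleton]
      constructor
      · rintro (⟨hd' | hd'⟩ | ⟨j, hj, hcj, hdj⟩)
        · exact Or.inl hd'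
        · exact Or.inr ⟨i, Or.inl rfl, hc, hd'⟩
        · exact Or.inr ⟨j, Or.inr hj, hcj, hdj⟩
      · rintro (hd' | ⟨j, (rfl | hj), hcj, hdj⟩)
        · exact Or.inl (Or.inl hd')
        · exact Or.inl (Or.inr hdj)
        · exact Or.inr ⟨j, hj, hcj, hdj⟩
    · constructor
      · rintro (hd' | ⟨j, hj, hcj, hdj⟩)
        · exact Or.inl hd'
        · exact Or.inr ⟨j, Or.inr hj, hcj, hdj⟩
      · rintro (hd' | ⟨j, (rfl | hj), hcj, hdj⟩)
        · exact Or.inl hd'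
        · exact absurd hcj hc
        · exact Or.inr ⟨j, hj, hcj, hdj⟩

lemma foldl_min_le_init : ∀ (l : List Int) (b : Int), l.foldl min b ≤ b
  | [], _ => le_refl _
  | x :: t, b => le_trans (foldl_min_le_init t (min b x)) (min_le_left _ _)

lemma foldl_min_le_mem : ∀ (l : List Int) (b y : Int), y ∈ l → l.foldl min b ≤ y := by
  intro l
  induction l with
  | nil => intro b y h; cases h
  | cons x t ih =>
    intro b y h
    rcases List.mem_cons.mp h with h | h
    · subst h
      exact le_trans (foldl_min_le_init t (min b y)) (min_le_right _ _)
    · exact ih (min b x) y h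

lemma foldl_min_eq_or_mem : ∀ (l : List Int) (b : Int), l.foldl min b = b ∨ l.foldl min b ∈ l := by
  intro l
  induction l with
  | nil => intro b; exact Or.inl rfl
  | cons x t ih =>
    intro b
    rcases ih (min b x) with h | h
    · rcases min_choice b x with hm | hm
      · exact Or.inl (by rw [List.foldl, h, hm])
      · exact Or.inr (by rw [List.foldl, h, hm]; exact List.mem_cons_self)
    · exact Or.inr (List.mem_cons_of_mem x h)

-- min over a nonempty cons (running-min loop) is ≤ every element
lemma foldl_min_le_of_mem_cons (d : Int) (r : List Int) (y : Int) (h : y ∈ d :: r) :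
    r.foldl min d ≤ y := by
  rcases List.mem_cons.mp h with h | h
  · subst h; exact foldl_min_le_init r y
  · exact foldl_min_le_mem r d y h

-- ===== VERDICT (by name: the statement is the Claim_ definition above) =====
theorem min_bsai_dist_py_spec : Claim_equal_min_bsai_dist_py := by
  intro pos a _
  unfold Spec_min_bsai_dist_py
  by_cases hnil : a = []
  · rw [min_bsai_dist_py, if_pos hnil, min_bsai_dist_py_alt, if_pos hnil]
  · have hlen : 0 < a.length := List.length_pos_iff.mpr hnil
    set i := locateGo pos a with hidef
    have hloc : bisectLeftGo a pos 0 a.length = i := by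
      have h := locateGo_eq_bisectLeftGo a pos a.length 0 a.length (by omega) (by omega) (le_refl _)
      simp at h
      omega
    have hile : i ≤ a.length := locateGo_le pos a
    -- the shared index window predicate
    set P : Int → Prop := fun d => ∃ j : Nat, i ≤ j + 1 ∧ j ≤ i + 1 ∧ j < a.length ∧
      d = |pos - a.getD j 0| with hP
    -- A's side
    set dists : List Int :=
      [(i : Int) - 1, (i : Int), (i : Int) + 1].foldl
        (fun acc v =>
          if 0 ≤ v ∧ v < (a.length : Int) then
            acc ++ [|pos - a.getD v.toNat 0|]
          else acc) [] with hdists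
    have hA : min_bsai_dist_py pos a =
        match PySem.List.min? dists (fun y => y) with
        | some m => m
        | none => 999999 := by
      rw [min_bsai_dist_py, if_neg hnil]
      simp only [hloc, hdists]
    have hDmem : ∀ d, d ∈ dists ↔ P d := by
      intro d
      rw [hdists, mem_windowFold]
      simp only [List.mem_nil_iff, false_or, List.mem_cons]
      constructor
      · rintro ⟨v, (rfl | rfl | rfl | hv), ⟨hv0, hvl⟩, hdv⟩
        · exact ⟨((i : Int) - 1).toNat, by omega, by omega, by omega, hdv⟩
        · exact ⟨i, by omega, by omega, by omega, by simpa using hdv⟩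
        · exact ⟨((i : Int) + 1).toNat, by omega, by omega, by omega, hdv⟩
        · cases hv
      · rintro ⟨j, h1, h2, h3, h4⟩
        refine ⟨(j : Int), ?_, ⟨by omega, by omega⟩, by simpa using h4⟩
        have : j + 1 = i ∨ j = i ∨ j = i + 1 := by omega
        rcases this with h | h | h
        · left; omega
        · right; left; omega
        · right; right; left; omega
    -- B's side
    set w : List Int := (a.drop (i - 1)).take ((i + 2) - (i - 1)) with hw
    have hB : min_bsai_dist_py_alt pos a =
        match PySem.List.min? (w.map (fun p => |pos - p|)) (fun v => v) with
        | some m => m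
        | none => 999999 := by
      rw [min_bsai_dist_py_alt, if_neg hnil]
      have hmax : max 0 ((i : Int) - 1) = ((i - 1 : Nat) : Int) := by omega
      have h2 : (i : Int) + 2 = ((i + 2 : Nat) : Int) := by omega
      simp only [← hidef, hmax, h2, PySem.List.slice_natCast, ← hw]
    have hWmem : ∀ d, d ∈ w.map (fun p => |pos - p|) ↔ P d := by
      intro d
      rw [List.mem_map]
      constructor
      · rintro ⟨p, hp, rfl⟩
        obtain ⟨t, ht, hpt⟩ := List.mem_iff_getElem.mp hp
        have htl : t < w.length := ht
        have hwlen : w.length = min ((i + 2) - (i - 1)) (a.length - (i - 1)) := by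
          rw [hw]; simp
        refine ⟨(i - 1) + t, by omega, by omega, by omega, ?_⟩
        have hgt : w[t] = a.getD ((i - 1) + t) 0 := take_drop_getElem a (i - 1) ((i + 2) - (i - 1)) t ht
        rw [← hpt, hgt]
      · rintro ⟨j, h1, h2, h3, h4⟩
        refine ⟨a.getD j 0, ?_, h4.symm⟩
        have hwlen : w.length = min ((i + 2) - (i - 1)) (a.length - (i - 1)) := by
          rw [hw]; simp
        refine List.mem_iff_getElem.mpr ⟨j - (i - 1), by omega, ?_⟩
        have hgt : w[j - (i - 1)]'(by omega) = a.getD ((i - 1) + (j - (i - 1))) 0 :=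
          take_drop_getElem a (i - 1) ((i + 2) - (i - 1)) (j - (i - 1)) (by simp; omega)
        rw [hgt]
        congr 1
        omega
    -- both candidate lists are nonempty: the index min i (len-1) is in the window
    have hP0 : P (|pos - a.getD (min i (a.length - 1)) 0|) :=
      ⟨min i (a.length - 1), by omega, by omega, by omega, rfl⟩
    have hdne : dists ≠ [] := by
      intro hni
      have hmem := (hDmem _).mpr hP0
      rw [hni] at hmem
      cases hmem
    have hwne : w.map (fun p => |pos - p|) ≠ [] := by
      intro hni
      have hmem := (hWmem _).mpr hP0
      rw [hni] at hmem
      cases hmem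
    obtain ⟨d, r, hdr⟩ := List.exists_cons_of_ne_nil hdne
    obtain ⟨e, s, hes⟩ := List.exists_cons_of_ne_nil hwne
    rw [hA, hB, hdr, hes, PySem.List.min?_id_cons, PySem.List.min?_id_cons]
    simp only []
    -- the two running minima agree: each value is a member of the other's list
    apply le_antisymm
    · have hmB : s.foldl min e ∈ d :: r := by
        rw [← hdr, hDmem, ← hWmem, hes]
        rcases foldl_min_eq_or_mem s e with hh | hh
        · rw [hh]; exact List.mem_cons_self
        · exact List.mem_cons_of_mem _ hh
      exact foldl_min_le_of_mem_cons d r _ hmB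
    · have hmA : r.foldl min d ∈ e :: s := by
        rw [← hes, hWmem, ← hDmem, hdr]
        rcases foldl_min_eq_or_mem r d with hh | hh
        · rw [hh]; exact List.mem_cons_self
        · exact List.mem_cons_of_mem _ hh
      exact foldl_min_le_of_mem_cons e s _ hmA
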